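-- pv_equiv track=rewrite | github.com/refanr/olsenolsen | cards.py | print_hand
-- ===== SOURCE A (Python) =====
-- def print_hand(hand):
--     values, suits = [], []
--     for card in hand:
--         values.append(card[0])
--         suits.append(card[1])
--
--     ret_str = " "
--     ret_str += "___ " * len(hand)
--     ret_str += "\n|"
--     for value in values:
--         if value == '10':
--             ret_str += value + " |"
--         else:
--             ret_str += value + "  |"
--     ret_str += "\n|"
--     for suit in suits:
--         ret_str += " " + suit + " |"
--     ret_str += "\n|"
--     for value in values:
--         if value == '10':
--             ret_str += " " + value + "|"
--         else:
--             ret_str += "  " + value + "|"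
--     ret_str += "\n "
--     ret_str += "\u203e\u203e\u203e " * len(hand)
--     ret_str += "\n  "
--     for i in range(len(hand)):
--         ret_str += str(i+1) + "   "
--
--     return ret_str
-- ===== SOURCE B (Python) =====
-- def print_hand(hand):
--     # one row-major pass: each card contributes one cell to each of six row buffers
--     caps, tops, mids, bots, lows, idxs = [], [], [], [], [], []
--     for i, (value, suit) in enumerate(hand):
--         caps.append("___ ")
--         tops.append(value + " |" if value == '10' else value + "  |")
--         mids.append(" " + suit + " |")
--         bots.append(" " + value + "|" if value == '10' else "  " + value + "|")
--         lows.append("\u203e\u203e\u203e ")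
--         idxs.append(str(i + 1) + "   ")
--     return (" " + "".join(caps)
--             + "\n|" + "".join(tops)
--             + "\n|" + "".join(mids)
--             + "\n|" + "".join(bots)
--             + "\n " + "".join(lows)
--             + "\n  " + "".join(idxs))
-- ===== Notes on version B (the rewrite author's own statement) =====
-- stated objective: alternative
-- what changed: Replaces A's column-major construction (a values/suits splitting pass plus three separate scans over values/suits and a range pass, each appending to one growing string) with a single row-major loop over the cards that fills six parallel row buffers, joined once at the end.
import Mathlib
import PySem

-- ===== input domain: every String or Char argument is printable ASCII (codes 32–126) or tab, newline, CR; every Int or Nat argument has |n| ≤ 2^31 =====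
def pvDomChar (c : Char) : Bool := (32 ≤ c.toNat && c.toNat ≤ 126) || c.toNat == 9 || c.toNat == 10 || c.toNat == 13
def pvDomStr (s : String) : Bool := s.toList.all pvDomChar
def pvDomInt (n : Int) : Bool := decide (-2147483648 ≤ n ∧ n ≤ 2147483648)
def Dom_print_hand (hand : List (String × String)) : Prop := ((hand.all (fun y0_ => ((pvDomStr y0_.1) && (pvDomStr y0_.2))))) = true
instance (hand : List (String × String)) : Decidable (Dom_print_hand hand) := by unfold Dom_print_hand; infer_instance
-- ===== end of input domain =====

-- B replaces A's column-major construction (split into values/suits, then three scans plus a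
-- range pass each appending to one growing string) by a single row-major loop over the cards
-- filling six parallel row buffers joined once at the end; same cost, different decomposition.

-- ===== PORT A =====
-- strings are accumulated as List Char (PySem's exact string representation); String.ofList at the end
def print_hand (hand : List (String × String)) : String :=
  let vs := hand.foldl
    (fun (p : List String × List String) card => (p.1 ++ [card.1], p.2 ++ [card.2])) ([], [])
  let values := vs.1
  let suits := vs.2
  let r1 := " ".toList
    ++ (List.replicate hand.length "___ ".toList).flatten            -- "___ " * len(hand)
    ++ "\n|".toList
  let r2 := values.foldl (fun s v =>
    s ++ (if v == "10" then v.toList ++ " |".toList else v.toList ++ "  |".toList)) r1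
  let r3 := r2 ++ "\n|".toList
  let r4 := suits.foldl (fun s su => s ++ (" ".toList ++ su.toList ++ " |".toList)) r3
  let r5 := r4 ++ "\n|".toList
  let r6 := values.foldl (fun s v =>
    s ++ (if v == "10" then " ".toList ++ v.toList ++ "|".toList
          else "  ".toList ++ v.toList ++ "|".toList)) r5
  let r7 := r6 ++ "\n ".toList
    ++ (List.replicate hand.length "‾‾‾ ".toList).flatten            -- "‾‾‾ " * len(hand)
    ++ "\n  ".toList
  let r8 := (PySem.List.pyRange 0 (PySem.List.len hand) 1).foldl
    (fun s i => s ++ (PySem.Int.toChars (i + 1) ++ "   ".toList)) r7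
  String.ofList r8

-- ===== PORT B =====
def print_hand_alt (hand : List (String × String)) : String :=
  let b := (PySem.List.enumerate hand 0).foldl
    (fun (b : List Char × List Char × List Char × List Char × List Char × List Char) ic =>
      (b.1 ++ "___ ".toList,
       b.2.1 ++ (if ic.2.1 == "10" then ic.2.1.toList ++ " |".toList
                 else ic.2.1.toList ++ "  |".toList),
       b.2.2.1 ++ (" ".toList ++ ic.2.2.toList ++ " |".toList),
       b.2.2.2.1 ++ (if ic.2.1 == "10" then " ".toList ++ ic.2.1.toList ++ "|".toList
                     else "  ".toList ++ ic.2.1.toList ++ "|".toList),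
       b.2.2.2.2.1 ++ "‾‾‾ ".toList,
       b.2.2.2.2.2 ++ (PySem.Int.toChars (ic.1 + 1) ++ "   ".toList)))
    ([], [], [], [], [], [])
  String.ofList (" ".toList ++ b.1 ++ "\n|".toList ++ b.2.1 ++ "\n|".toList ++ b.2.2.1
    ++ "\n|".toList ++ b.2.2.2.1 ++ "\n ".toList ++ b.2.2.2.2.1 ++ "\n  ".toList ++ b.2.2.2.2.2)

-- ===== PRECONDITION & SPEC =====
def Spec_print_hand (hand : List (String × String)) (out : String) : Prop := out = print_hand_alt hand
instance (hand : List (String × String)) (out : String) : Decidable (Spec_print_hand hand out) := by unfold Spec_print_hand; infer_instance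

-- ===== CLAIM (what is proved, stated in full; the proofs are below) =====
def Claim_equal_print_hand : Prop := ∀ (hand : List (String × String)), Dom_print_hand hand → Spec_print_hand hand (print_hand hand)

-- ===== LEMMAS AND PROOFS =====

-- A's first loop builds the two column lists: it is the pair (map fst, map snd).
theorem pv_split_pair (hand : List (String × String)) (a b : List String) :
    hand.foldl (fun (p : List String × List String) card => (p.1 ++ [card.1], p.2 ++ [card.2])) (a, b)
      = (a ++ hand.map Prod.fst, b ++ hand.map Prod.snd) := by
  induction hand generalizing a b with
  | nil => simp
  | cons c t ih => simp [List.foldl_cons, ih]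

-- B's single loop splits into six independent append-folds (one per row buffer).
theorem pv_tup6 {α : Type} (g1 g2 g3 g4 g5 g6 : α → List Char) (l : List α)
    (a1 a2 a3 a4 a5 a6 : List Char) :
    l.foldl (fun (b : List Char × List Char × List Char × List Char × List Char × List Char) x =>
        (b.1 ++ g1 x, b.2.1 ++ g2 x, b.2.2.1 ++ g3 x, b.2.2.2.1 ++ g4 x,
         b.2.2.2.2.1 ++ g5 x, b.2.2.2.2.2 ++ g6 x)) (a1, a2, a3, a4, a5, a6)
      = (a1 ++ l.flatMap g1, a2 ++ l.flatMap g2, a3 ++ l.flatMap g3,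
         a4 ++ l.flatMap g4, a5 ++ l.flatMap g5, a6 ++ l.flatMap g6) := by
  induction l generalizing a1 a2 a3 a4 a5 a6 with
  | nil => simp
  | cons x t ih => simp [List.foldl_cons, ih]

-- a per-card cell that ignores the index: flatMap over enumerate = flatMap over the list
theorem pv_flatMap_enumerate_snd {α : Type} (g : α → List Char) (xs : List α) (s : Int) :
    (PySem.List.enumerate xs s).flatMap (fun ic => g ic.2) = xs.flatMap g := by
  induction xs generalizing s with
  | nil => simp [PySem.List.enumerate_nil]
  | cons x t ih => simp [PySem.List.enumerate_cons, ih]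

-- the index-label cells of B are exactly A's range loop body
theorem pv_flatMap_enumerate_fst {α : Type} (g : Int → List Char) (xs : List α) (s : Int) :
    (PySem.List.enumerate xs s).flatMap (fun ic => g ic.1)
      = (PySem.List.pyRange s (s + xs.length) 1).flatMap g := by
  induction xs generalizing s with
  | nil => simp [PySem.List.enumerate_nil, PySem.List.pyRange_one_eq_nil]
  | cons x t ih =>
      rw [PySem.List.enumerate_cons, PySem.List.pyRange_one_cons
        (by simp only [List.length_cons]; push_cast; omega)]
      simp only [List.flatMap_cons, ih]
      have h : s + ((x :: t).length : Int) = (s + 1) + (t.length : Int) := by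
        simp only [List.length_cons]; push_cast; omega
      rw [h]

-- a constant cell: flatMap of a constant is flatten of a replicate
theorem pv_flatMap_const {α : Type} (c : List Char) (xs : List α) :
    xs.flatMap (fun _ => c) = (List.replicate xs.length c).flatten := by
  induction xs with
  | nil => simp
  | cons x t ih => simp [List.replicate_succ, ih]

-- ===== VERDICT (by name: the statement is the Claim_ definition above) =====
theorem print_hand_spec : Claim_equal_print_hand := by
  intro hand _
  show print_hand hand = print_hand_alt hand
  unfold print_hand print_hand_alt
  rw [pv_split_pair, pv_tup6]
  simp only [List.nil_append, PySem.List.foldl_append_eq_flatMap, List.flatMap_map,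
    pv_flatMap_const, PySem.List.length_enumerate]
  rw [show (PySem.List.enumerate hand 0).flatMap
        (fun ic => if ic.2.1 == "10" then ic.2.1.toList ++ " |".toList
                   else ic.2.1.toList ++ "  |".toList)
      = hand.flatMap (fun c => if c.1 == "10" then c.1.toList ++ " |".toList
                   else c.1.toList ++ "  |".toList)
      from pv_flatMap_enumerate_snd
        (fun c => if c.1 == "10" then c.1.toList ++ " |".toList
                  else c.1.toList ++ "  |".toList) hand 0]
  rw [show (PySem.List.enumerate hand 0).flatMap
        (fun ic => " ".toList ++ ic.2.2.toList ++ " |".toList)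
      = hand.flatMap (fun c => " ".toList ++ c.2.toList ++ " |".toList)
      from pv_flatMap_enumerate_snd (fun c => " ".toList ++ c.2.toList ++ " |".toList) hand 0]
  rw [show (PySem.List.enumerate hand 0).flatMap
        (fun ic => if ic.2.1 == "10" then " ".toList ++ ic.2.1.toList ++ "|".toList
                   else "  ".toList ++ ic.2.1.toList ++ "|".toList)
      = hand.flatMap (fun c => if c.1 == "10" then " ".toList ++ c.1.toList ++ "|".toList
                   else "  ".toList ++ c.1.toList ++ "|".toList)
      from pv_flatMap_enumerate_snd
        (fun c => if c.1 == "10" then " ".toList ++ c.1.toList ++ "|".toList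
                  else "  ".toList ++ c.1.toList ++ "|".toList) hand 0]
  rw [show (PySem.List.enumerate hand 0).flatMap
        (fun ic => PySem.Int.toChars (ic.1 + 1) ++ "   ".toList)
      = (PySem.List.pyRange 0 (0 + hand.length) 1).flatMap
          (fun i => PySem.Int.toChars (i + 1) ++ "   ".toList)
      from pv_flatMap_enumerate_fst (fun i => PySem.Int.toChars (i + 1) ++ "   ".toList) hand 0]
  simp [PySem.List.len_eq, List.append_assoc]
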